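-- pv_equiv track=rewrite | github.com/fengzhiyuanyi/Airtest | airtest/ext/info/log.py | pick_by_contain
-- ===== SOURCE A (Python) =====
-- def pick_by_contain(lines, start_index, continue_sign):
--     line_count = 1
--     new_trace = lines[start_index]
--     start_index += 1
--     while start_index < len(lines) and continue_sign in lines[start_index] and line_count < 60:
--         line_count += 1
--         new_trace += '\n' + lines[start_index]
--         start_index += 1
--     new_trace += '\n' + lines[start_index]
--     start_index += 1
--     return start_index, new_trace
-- ===== SOURCE B (Python) =====
-- def pick_by_contain(lines, start_index, continue_sign):
--     # Recursive decomposition: the suffix of the block is computed first and the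
--     # current line is prepended on return; 'remaining' counts down the 59-line cap.
--     def rec(i, remaining):
--         if remaining > 0 and i < len(lines) and continue_sign in lines[i]:
--             end, tail = rec(i + 1, remaining - 1)
--             return end, lines[i] + '\n' + tail
--         return i + 1, lines[i]
--     end, tail = rec(start_index + 1, 59)
--     return end, lines[start_index] + '\n' + tail
-- ===== Notes on version B (the rewrite author's own statement) =====
-- stated objective: alternative
-- what changed: B replaces A's iterative loop with mutable accumulators (line counter and growing trace string) by a recursive helper that descends first and builds the trace back-to-front on return, prepending each line to the recursively built tail; the cap is a countdown argument instead of a counter compared to 60.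
import Mathlib
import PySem

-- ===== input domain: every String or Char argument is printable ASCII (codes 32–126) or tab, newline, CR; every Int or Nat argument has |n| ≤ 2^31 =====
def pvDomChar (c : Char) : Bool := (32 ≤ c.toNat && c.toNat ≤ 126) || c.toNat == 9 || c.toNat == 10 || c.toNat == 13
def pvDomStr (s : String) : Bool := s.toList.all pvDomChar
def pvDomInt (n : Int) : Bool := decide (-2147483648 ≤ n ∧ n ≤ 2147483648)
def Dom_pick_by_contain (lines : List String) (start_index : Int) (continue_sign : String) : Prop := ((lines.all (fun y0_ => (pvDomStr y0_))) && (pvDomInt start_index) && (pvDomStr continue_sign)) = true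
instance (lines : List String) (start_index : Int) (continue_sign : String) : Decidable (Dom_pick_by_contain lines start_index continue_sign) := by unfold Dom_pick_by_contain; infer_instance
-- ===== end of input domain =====

-- B builds the trace recursively back-to-front (tail first, each line prepended on return,
-- the 60-line cap a countdown argument) instead of A's iterative accumulate-in-a-loop (objective: alternative).

-- ===== PORT A =====
-- A's while loop; state = (current index, line_count, accumulated new_trace).
-- The fuel only makes the recursion structural: the Python loop runs at most 59 iterations
-- (line_count goes 1 → 60), so fuel 64 is never exhausted; the fuel-0 branch repeats the exit branch.
def pvLoopA (lines : List String) (continue_sign : String) : Nat → Int → Int → String → Int × String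
  | 0, s, _, trace => (s + 1, trace ++ "\n" ++ PySem.List.pyGetD lines s "")
  | fuel + 1, s, count, trace =>
    if s < (lines.length : Int) ∧ PySem.Str.isIn continue_sign (PySem.List.pyGetD lines s "") = true ∧ count < 60 then
      pvLoopA lines continue_sign fuel (s + 1) (count + 1) (trace ++ "\n" ++ PySem.List.pyGetD lines s "")
    else (s + 1, trace ++ "\n" ++ PySem.List.pyGetD lines s "")

def pick_by_contain (lines : List String) (start_index : Int) (continue_sign : String) : Int × String :=
  pvLoopA lines continue_sign 64 (start_index + 1) 1 (PySem.List.pyGetD lines start_index "")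

-- ===== PORT B =====
-- B's recursive helper rec(i, remaining): structural recursion on the countdown.
def pvRecB (lines : List String) (continue_sign : String) : Nat → Int → Int × String
  | 0, i => (i + 1, PySem.List.pyGetD lines i "")
  | remaining + 1, i =>
    if i < (lines.length : Int) ∧ PySem.Str.isIn continue_sign (PySem.List.pyGetD lines i "") = true then
      let (e, tail) := pvRecB lines continue_sign remaining (i + 1)
      (e, PySem.List.pyGetD lines i "" ++ "\n" ++ tail)
    else (i + 1, PySem.List.pyGetD lines i "")

def pick_by_contain_alt (lines : List String) (start_index : Int) (continue_sign : String) : Int × String :=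
  let (e, tail) := pvRecB lines continue_sign 59 (start_index + 1)
  (e, PySem.List.pyGetD lines start_index "" ++ "\n" ++ tail)

-- ===== PRECONDITION & SPEC =====
-- Pre_ = exactly where the Python A returns (no IndexError): the first index is in range and the
-- scan starting at start_index+1 fails (no continue_sign, or the 60-line cap, reached at k ≥ 59)
-- at some index still inside the list, so the final lines[...] access is in range.
def Pre_pick_by_contain (lines : List String) (start_index : Int) (continue_sign : String) : Prop :=
  -(lines.length : Int) ≤ start_index ∧
  ∃ k : Nat, k < 2 * lines.length ∧ start_index + 1 + (k : Int) < (lines.length : Int) ∧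
    ((59 : Int) ≤ (k : Int) ∨ ¬ PySem.Str.isIn continue_sign (PySem.List.pyGetD lines (start_index + 1 + (k : Int)) "") = true)
instance (lines : List String) (start_index : Int) (continue_sign : String) : Decidable (Pre_pick_by_contain lines start_index continue_sign) := by unfold Pre_pick_by_contain; infer_instance

def pvWitness_pick_by_contain : List String × Int × String := (["a*", "b*", "c"], 0, "*")

def Spec_pick_by_contain (lines : List String) (start_index : Int) (continue_sign : String) (out : Int × String) : Prop := out = pick_by_contain_alt lines start_index continue_sign
instance (lines : List String) (start_index : Int) (continue_sign : String) (out : Int × String) : Decidable (Spec_pick_by_contain lines start_index continue_sign out) := by unfold Spec_pick_by_contain; infer_instance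

-- ===== CLAIM (what is proved, stated in full; the proofs are below) =====
def Claim_equal_pick_by_contain : Prop := ∀ (lines : List String) (start_index : Int) (continue_sign : String), Dom_pick_by_contain lines start_index continue_sign → Pre_pick_by_contain lines start_index continue_sign → Spec_pick_by_contain lines start_index continue_sign (pick_by_contain lines start_index continue_sign)

-- ===== LEMMAS AND PROOFS =====

-- A's loop equals B's recursion: the accumulator 'trace' distributes over B's prepended result.
-- Invariant: count = 60 - remaining, and fuel exceeds the countdown.
theorem loopA_eq_recB (lines : List String) (sign : String) :
    ∀ (rem fuel : Nat) (s : Int) (trace : String), rem < fuel →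
    pvLoopA lines sign fuel s (60 - (rem : Int)) trace
      = ((pvRecB lines sign rem s).1, trace ++ "\n" ++ (pvRecB lines sign rem s).2) := by
  intro rem
  induction rem with
  | zero =>
    intro fuel s trace hf
    match fuel, hf with
    | f + 1, _ =>
      simp only [pvLoopA, pvRecB]
      rw [if_neg (by intro ⟨_, _, h3⟩; omega)]
  | succ r ih =>
    intro fuel s trace hf
    match fuel, hf with
    | f + 1, hf =>
      simp only [pvLoopA, pvRecB]
      by_cases hc : s < (lines.length : Int) ∧ PySem.Str.isIn sign (PySem.List.pyGetD lines s "") = true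
      · rw [if_pos ⟨hc.1, hc.2, by push_cast; omega⟩, if_pos hc]
        have : (60 : Int) - (r + 1 : Nat) + 1 = 60 - (r : Nat) := by push_cast; omega
        rw [this, ih f (s + 1) (trace ++ "\n" ++ PySem.List.pyGetD lines s "") (by omega)]
        cases h : pvRecB lines sign r (s + 1) with
        | mk e tail => simp [String.append_assoc]
      · rw [if_neg (by intro ⟨h1, h2, _⟩; exact hc ⟨h1, h2⟩), if_neg hc]

-- ===== VERDICT (by name: the statement is the Claim_ definition above) =====
theorem pick_by_contain_spec : Claim_equal_pick_by_contain := by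
  intro lines start_index continue_sign _ _
  unfold Spec_pick_by_contain pick_by_contain pick_by_contain_alt
  have h := loopA_eq_recB lines continue_sign 59 64 (start_index + 1)
      (PySem.List.pyGetD lines start_index "") (by omega)
  norm_num at h
  rw [h]
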